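-- pv_equiv track=rewrite | github.com/daniel-reich/ubiquitous-fiesta | YcqAY72nZNPtvofuJ_22.py | quad_sequence
-- ===== SOURCE A (Python) =====
-- def quad_sequence(lst):
--   x, y, z = lst[-3:]
--   delta = z - 2 * y + x
--   diff = z - y
--   seq = [z]
--
--   for _ in range(len(lst)):
--     diff += delta
--     seq.append(seq[-1] + diff)
--
--   return seq[1:]
-- ===== SOURCE B (Python) =====
-- def quad_sequence(lst):
--   x, y, z = lst[-3:]
--   delta = z - 2 * y + x
--   return [z + k * (z - y) + delta * (k * (k + 1) // 2) for k in range(1, len(lst) + 1)]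
-- ===== Notes on version B (the rewrite author's own statement) =====
-- stated objective: alternative
-- what changed: Replaces the running diff/last-element accumulator loop with a closed-form comprehension computing each extended term directly from its index k as z + k*(z-y) + delta*k*(k+1)//2.
import Mathlib
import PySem

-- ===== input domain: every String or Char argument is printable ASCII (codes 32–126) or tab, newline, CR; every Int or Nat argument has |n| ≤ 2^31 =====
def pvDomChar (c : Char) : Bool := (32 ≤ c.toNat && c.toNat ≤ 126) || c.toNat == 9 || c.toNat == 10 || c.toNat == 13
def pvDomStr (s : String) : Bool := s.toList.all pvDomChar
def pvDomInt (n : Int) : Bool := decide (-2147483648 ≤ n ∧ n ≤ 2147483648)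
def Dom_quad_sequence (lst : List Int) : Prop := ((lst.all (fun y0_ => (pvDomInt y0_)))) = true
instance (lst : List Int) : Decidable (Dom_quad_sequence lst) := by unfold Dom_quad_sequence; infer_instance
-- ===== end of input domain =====

-- B replaces A's running diff/last-element accumulator loop with a closed-form
-- per-index formula z + k*(z-y) + delta*k*(k+1)//2 (alternative decomposition, same cost).


-- ===== PORT A =====
def quad_sequence (lst : List Int) : List Int :=
  match PySem.List.slice lst (some (-3)) none with
  | [x, y, z] =>
    let delta := z - 2 * y + x
    let st := (List.range lst.length).foldl
      (fun (s : Int × List Int) _ =>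
        let diff := s.1 + delta
        (diff, s.2 ++ [(PySem.List.pyGet? s.2 (-1)).getD 0 + diff]))
      (z - y, [z])
    PySem.List.slice st.2 (some 1) none
  | _ => []  -- unreachable under Pre_ (Python raises on fewer than 3 elements)

-- ===== PORT B =====
def quad_sequence_alt (lst : List Int) : List Int :=
  -- x, y, z = lst[-3:]  (guard makes the unpacking total; Python raises when it fails)
  let t := PySem.List.slice lst (some (-3)) none
  if t.length = 3 then
    let x := t.getD 0 0
    let y := t.getD 1 0
    let z := t.getD 2 0
    let delta := z - 2 * y + x
    (PySem.List.pyRange 1 ((lst.length : Int) + 1) 1).map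
      (fun k => z + k * (z - y) + delta * PySem.Int.floordiv (k * (k + 1)) 2)
  else []  -- unreachable under Pre_ (Python raises on fewer than 3 elements)

-- ===== PRECONDITION & SPEC =====
-- Pre_ excludes lists of fewer than 3 elements, on which Python A (and B) raise ValueError at the unpacking.
def Pre_quad_sequence (lst : List Int) : Prop := 3 ≤ lst.length
instance (lst : List Int) : Decidable (Pre_quad_sequence lst) := by unfold Pre_quad_sequence; infer_instance
def pvWitness_quad_sequence : List Int := [1, 2, 4]

def Spec_quad_sequence (lst : List Int) (out : List Int) : Prop := out = quad_sequence_alt lst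
instance (lst : List Int) (out : List Int) : Decidable (Spec_quad_sequence lst out) := by unfold Spec_quad_sequence; infer_instance

-- ===== CLAIM (what is proved, stated in full; the proofs are below) =====
def Claim_equal_quad_sequence : Prop := ∀ (lst : List Int), Dom_quad_sequence lst → Pre_quad_sequence lst → Spec_quad_sequence lst (quad_sequence lst)

-- ===== LEMMAS AND PROOFS =====

-- the closed form, written over a Nat index
def pvF (y z delta : Int) (k : Nat) : Int := z + k * (z - y) + delta * ((k * (k + 1) / 2 : Nat) : Int)

theorem pvTri (n : Nat) : (n + 1) * (n + 2) / 2 = n * (n + 1) / 2 + (n + 1) := by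
  obtain ⟨m, hm⟩ := Nat.even_mul_succ_self n
  have h2 : (n + 1) * (n + 2) = n * (n + 1) + 2 * (n + 1) := by ring
  omega

theorem pvF_step (y z delta : Int) (n : Nat) :
    pvF y z delta n + (z - y + ((n : Int) + 1) * delta) = pvF y z delta (n + 1) := by
  unfold pvF
  have := pvTri n
  push_cast [this]
  ring

theorem pvInv (y z delta : Int) (n : Nat) :
    (List.range n).foldl
      (fun (s : Int × List Int) _ =>
        let diff := s.1 + delta
        (diff, s.2 ++ [(PySem.List.pyGet? s.2 (-1)).getD 0 + diff]))
      (z - y, [z])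
    = (z - y + n * delta, (List.range (n + 1)).map (pvF y z delta)) := by
  induction n with
  | zero => simp [pvF]
  | succ n ih =>
    rw [List.range_succ, List.foldl_append, ih]
    have hseq : (List.range (n + 1 + 1)).map (pvF y z delta)
        = (List.range (n + 1)).map (pvF y z delta) ++ [pvF y z delta (n + 1)] := by
      rw [List.range_succ, List.map_append]; rfl
    have hlast : (List.range (n + 1)).map (pvF y z delta)
        = (List.range n).map (pvF y z delta) ++ [pvF y z delta n] := by
      rw [List.range_succ, List.map_append]; rfl
    simp only [List.foldl_cons, List.foldl_nil, hseq, hlast,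
      PySem.List.pyGet?_neg_one_append_singleton, Option.getD_some]
    refine Prod.ext ?_ ?_
    · push_cast; ring
    · have hv : pvF y z delta n + (z - y + (n : Int) * delta + delta) = pvF y z delta (n + 1) := by
        rw [← pvF_step y z delta n]; ring
      simp only []
      rw [hv]

theorem quad_sequence_eq_alt (lst : List Int) (h : 3 ≤ lst.length) :
    quad_sequence lst = quad_sequence_alt lst := by
  have hsl : PySem.List.slice lst (some (-3)) none = lst.drop (lst.length - 3) :=
    PySem.List.slice_from_neg_ofNat lst 3 (by omega)
  have hlen : (lst.drop (lst.length - 3)).length = 3 := by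
    simp [List.length_drop]; omega
  obtain ⟨x, y, z, hxyz⟩ := List.length_eq_three.mp hlen
  rw [hxyz] at hsl
  unfold quad_sequence quad_sequence_alt
  simp only [hsl, List.length_cons, List.length_nil, if_true, List.getD_cons_zero, List.getD_cons_succ]
  simp only [pvInv y z (z - 2 * y + x) lst.length, PySem.List.slice_from_one]
  rw [PySem.List.pyRange_one]
  have hn : (((lst.length : Int) + 1 - 1).toNat) = lst.length := by omega
  rw [hn, List.range_succ_eq_map, List.map_cons, List.tail_cons, List.map_map, List.map_map]
  refine List.map_congr_left (fun k _ => ?_)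
  simp only [Function.comp]
  unfold pvF
  have hf : PySem.Int.floordiv ((1 + (k : Int)) * (1 + (k : Int) + 1)) 2
      = (((k + 1) * (k + 1 + 1) / 2 : Nat) : Int) := by
    have : (1 + (k : Int)) * (1 + (k : Int) + 1) = (((k + 1) * (k + 1 + 1) : Nat) : Int) := by
      push_cast; ring
    rw [this]
    exact_mod_cast PySem.Int.floordiv_natCast ((k + 1) * (k + 1 + 1)) 2
  rw [hf]
  push_cast
  ring

-- ===== VERDICT (by name: the statement is the Claim_ definition above) =====
theorem quad_sequence_spec : Claim_equal_quad_sequence := by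
  intro lst _ hpre
  exact quad_sequence_eq_alt lst hpre
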